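-- pv_equiv track=rewrite | github.com/chnblg/mahle_digitalization | src/visualization/visualize.py | zero_pad_list
-- ===== SOURCE A (Python) =====
-- def zero_pad_list(full_list, short_list, counts_list):
--
--     expanded_list = [x if x in short_list else 0 for x in full_list]
--     expanded_counts_list = []
--     index = 0
--     for x in expanded_list:
--
--         if x != 0:
--             expanded_counts_list.append(counts_list[index])
--             index = index + 1
--         else:
--             expanded_counts_list.append(0)
--
--     return expanded_list, expanded_counts_list
-- ===== SOURCE B (Python) =====
-- def zero_pad_list(full_list, short_list, counts_list):
--     # Scatter formulation: compute the nonzero positions once, preallocate a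
--     # zero list, and write counts directly at those positions (no running index,
--     # no per-element append branch); membership via a set built once.
--     members = set(short_list)
--     expanded_list = [x if x in members else 0 for x in full_list]
--     positions = [i for i, v in enumerate(expanded_list) if v != 0]
--     expanded_counts_list = [0] * len(full_list)
--     for pos, c in zip(positions, counts_list):
--         expanded_counts_list[pos] = c
--     return expanded_list, expanded_counts_list
-- ===== Notes on version B (the rewrite author's own statement) =====
-- stated objective: faster
-- what changed: B replaces A's sequential append loop with a running count index by a scatter: it computes the nonzero positions once, preallocates a zero-filled counts list and writes each count directly at its position via zip; membership uses a set built once.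
import Mathlib
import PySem

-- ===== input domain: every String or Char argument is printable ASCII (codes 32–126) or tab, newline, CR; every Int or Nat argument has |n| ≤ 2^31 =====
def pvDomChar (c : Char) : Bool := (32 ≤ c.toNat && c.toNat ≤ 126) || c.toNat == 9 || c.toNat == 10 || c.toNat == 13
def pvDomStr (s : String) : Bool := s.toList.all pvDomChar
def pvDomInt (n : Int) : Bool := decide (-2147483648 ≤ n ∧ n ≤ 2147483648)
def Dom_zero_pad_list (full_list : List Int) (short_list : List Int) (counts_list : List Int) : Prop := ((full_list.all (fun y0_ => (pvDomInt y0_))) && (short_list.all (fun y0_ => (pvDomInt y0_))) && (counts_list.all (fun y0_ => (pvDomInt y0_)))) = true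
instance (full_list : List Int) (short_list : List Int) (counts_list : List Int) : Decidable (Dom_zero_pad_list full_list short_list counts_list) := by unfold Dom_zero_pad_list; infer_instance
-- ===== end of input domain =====

-- B replaces A's sequential append-with-running-index by a scatter: it computes the
-- nonzero positions once and writes the counts directly into a preallocated zero list
-- (alternative decomposition; membership via a set built once).

-- ===== PORT A =====
-- counts_list[index] is ported as (pyGet? …).getD 0: Python raises IndexError there, excluded by Pre_.
def zero_pad_list (full_list : List Int) (short_list : List Int) (counts_list : List Int) : List Int × List Int :=
  let expanded_list := full_list.map (fun x => if short_list.contains x then x else 0)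
  let st := expanded_list.foldl
    (fun (acc : List Int × Int) x =>
      if x ≠ 0 then (acc.1 ++ [(PySem.List.pyGet? counts_list acc.2).getD 0], acc.2 + 1)
      else (acc.1 ++ [0], acc.2))
    ([], 0)
  (expanded_list, st.1)

-- ===== PORT B =====
-- expanded_counts_list[pos] = c is List.set pos.toNat c: pos comes from enumerate of
-- expanded_list, so it is a nonnegative in-range index and List.set is Python's assignment.
def zero_pad_list_alt (full_list : List Int) (short_list : List Int) (counts_list : List Int) : List Int × List Int :=
  let members : PySem.Set Int := PySem.Set.ofList short_list
  let expanded_list := full_list.map (fun x => if PySem.Set.contains members x then x else 0)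
  let positions := (PySem.List.enumerate expanded_list).filterMap
    (fun p => if p.2 ≠ 0 then some p.1 else none)
  let init := List.replicate full_list.length (0 : Int)
  let expanded_counts_list := (positions.zip counts_list).foldl
    (fun acc pc => acc.set pc.1.toNat pc.2) init
  (expanded_list, expanded_counts_list)

-- ===== PRECONDITION & SPEC =====
-- Pre_ excludes exactly the inputs where Python A raises IndexError: more nonzero members
-- in full_list than entries in counts_list.
def Pre_zero_pad_list (full_list : List Int) (short_list : List Int) (counts_list : List Int) : Prop :=
  (full_list.filter (fun x => short_list.contains x && x ≠ 0)).length ≤ counts_list.length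
instance (full_list : List Int) (short_list : List Int) (counts_list : List Int) : Decidable (Pre_zero_pad_list full_list short_list counts_list) := by unfold Pre_zero_pad_list; infer_instance
def pvWitness_zero_pad_list : List Int × List Int × List Int := ([1, 2, 0, 3], [1, 3], [5, 6])

def Spec_zero_pad_list (full_list : List Int) (short_list : List Int) (counts_list : List Int) (out : List Int × List Int) : Prop := out = zero_pad_list_alt full_list short_list counts_list
instance (full_list : List Int) (short_list : List Int) (counts_list : List Int) (out : List Int × List Int) : Decidable (Spec_zero_pad_list full_list short_list counts_list out) := by unfold Spec_zero_pad_list; infer_instance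

-- ===== CLAIM (what is proved, stated in full; the proofs are below) =====
def Claim_equal_zero_pad_list : Prop := ∀ (full_list : List Int) (short_list : List Int) (counts_list : List Int), Dom_zero_pad_list full_list short_list counts_list → Pre_zero_pad_list full_list short_list counts_list → Spec_zero_pad_list full_list short_list counts_list (zero_pad_list full_list short_list counts_list)

-- ===== LEMMAS AND PROOFS =====

-- "consume the counts from the front" characterization shared by both proofs
def pvCnt (cl : List Int) (e : List Int) : List Int :=
  match e with
  | [] => []
  | x :: t => if x ≠ 0 then cl.headD 0 :: pvCnt cl.tail t else 0 :: pvCnt cl t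

theorem pv_contains_ofList (sl : List Int) (x : Int) :
    PySem.Set.contains (PySem.Set.ofList sl) x = sl.contains x := by
  rw [Bool.eq_iff_iff]
  simp [PySem.Set.contains, PySem.Set.mem_ofList]

-- A's count loop equals pvCnt on the dropped counts list.
theorem pv_foldA (cl : List Int) : ∀ (e : List Int) (l : List Int) (n : Int), 0 ≤ n →
    (e.foldl
      (fun (acc : List Int × Int) x =>
        if x ≠ 0 then (acc.1 ++ [(PySem.List.pyGet? cl acc.2).getD 0], acc.2 + 1)
        else (acc.1 ++ [0], acc.2))
      (l, n)).1 = l ++ pvCnt (cl.drop n.toNat) e := by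
  intro e
  induction e with
  | nil => intro l n _; simp [pvCnt]
  | cons x t ih =>
    intro l n hn
    simp only [List.foldl_cons]
    by_cases h : x ≠ 0
    · simp only [if_pos h]
      rw [ih _ (n + 1) (by omega)]
      have h1 : (n + 1).toNat = n.toNat + 1 := by omega
      rw [h1, ← List.tail_drop]
      rw [PySem.List.pyGet?_of_nonneg cl hn]
      simp [pvCnt, h, ← List.head?_drop, List.headD_eq_head?_getD]
    · simp only [if_neg h]
      rw [ih _ n hn]
      simp [pvCnt, h]

-- positions computed from enumerate at start s are the start-0 positions shifted by s
theorem pv_enum_shift (t : List Int) : ∀ (s : Int),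
    (PySem.List.enumerate t s).filterMap (fun p => if p.2 ≠ 0 then some p.1 else none) =
    ((PySem.List.enumerate t 0).filterMap (fun p => if p.2 ≠ 0 then some p.1 else none)).map (· + s) := by
  induction t with
  | nil => intro s; simp [PySem.List.enumerate]
  | cons x t ih =>
    intro s
    rw [PySem.List.enumerate_cons, PySem.List.enumerate_cons]
    by_cases h : x ≠ 0
    · simp only [List.filterMap_cons, if_pos h, ih (s + 1), ih 1, zero_add,
        List.map_cons, List.map_map]
      refine List.cons_eq_cons.mpr ⟨by ring, List.map_congr_left fun a _ => ?_⟩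
      simp only [Function.comp_apply]; ring
    · simp only [List.filterMap_cons, if_neg h, ih (s + 1), ih 1, zero_add, List.map_map]
      exact List.map_congr_left fun a _ => by simp only [Function.comp_apply]; ring

theorem pv_pos_nonneg (t : List Int) (p : Int)
    (hp : p ∈ (PySem.List.enumerate t 0).filterMap (fun q => if q.2 ≠ 0 then some q.1 else none)) :
    0 ≤ p := by
  obtain ⟨q, hq, hq2⟩ := List.mem_filterMap.mp hp
  obtain ⟨k, hk, rfl⟩ := (PySem.List.mem_enumerate_iff _ _ _).mp hq
  split_ifs at hq2
  · cases hq2; omega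

-- scattering at positions all shifted by +1 into a cons leaves the head alone
theorem pv_scatter_shift : ∀ (pcs : List (Int × Int)), (∀ pc ∈ pcs, 0 ≤ pc.1) →
    ∀ (h0 : Int) (rest : List Int),
    pcs.foldl (fun acc pc => acc.set (pc.1 + 1).toNat pc.2) (h0 :: rest) =
    h0 :: pcs.foldl (fun acc pc => acc.set pc.1.toNat pc.2) rest := by
  intro pcs
  induction pcs with
  | nil => intro _ h0 rest; simp
  | cons pc t ih =>
    intro hall h0 rest
    simp only [List.foldl_cons]
    have hp : 0 ≤ pc.1 := hall pc (by simp)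
    have h1 : (pc.1 + 1).toNat = pc.1.toNat + 1 := by omega
    rw [h1, List.set_cons_succ]
    exact ih (fun q hq => hall q (by simp [hq])) h0 _

-- B's scatter equals pvCnt
theorem pv_scatter (e : List Int) : ∀ (cl : List Int),
    ((((PySem.List.enumerate e 0).filterMap (fun p => if p.2 ≠ 0 then some p.1 else none)).zip cl).foldl
      (fun acc pc => acc.set pc.1.toNat pc.2) (List.replicate e.length 0)) = pvCnt cl e := by
  induction e with
  | nil => intro cl; simp [PySem.List.enumerate, pvCnt]
  | cons x t ih =>
    intro cl
    rw [PySem.List.enumerate_cons]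
    by_cases h : x ≠ 0
    · simp only [List.filterMap_cons, if_pos h, List.length_cons, List.replicate_succ,
        zero_add]
      rw [pv_enum_shift t 1]
      cases cl with
      | nil =>
        simp only [List.zip_nil_right, List.foldl_nil, pvCnt, if_pos h]
        clear ih h
        induction t with
        | nil => simp [pvCnt]
        | cons y s ihs =>
          simp only [pvCnt, List.length_cons, List.replicate_succ] at *
          split_ifs <;> simp [ihs]
      | cons c0 clt =>
        simp only [List.zip_cons_cons, List.foldl_cons, Int.toNat_zero, List.set_cons_zero]
        rw [List.zip_map_left, List.foldl_map]
        have := pv_scatter_shift (((PySem.List.enumerate t 0).filterMap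
            (fun p => if p.2 ≠ 0 then some p.1 else none)).zip clt)
          (fun pc hpc => pv_pos_nonneg t pc.1
            (List.of_mem_zip hpc).1) c0 (List.replicate t.length 0)
        simp only [Prod.map, id_eq]
        rw [this, ih clt]
        simp [pvCnt, h]
    · simp only [List.filterMap_cons, if_neg h, List.length_cons, List.replicate_succ,
        zero_add]
      rw [pv_enum_shift t 1]
      rw [List.zip_map_left, List.foldl_map]
      have := pv_scatter_shift
        ((((PySem.List.enumerate t 0).filterMap (fun p => if p.2 ≠ 0 then some p.1 else none)).zip cl))
        (fun pc hpc => pv_pos_nonneg t pc.1 (List.of_mem_zip hpc).1)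
        0 (List.replicate t.length 0)
      simp only [Prod.map, id_eq]
      rw [this, ih cl]
      simp [pvCnt, h]

theorem zero_pad_list_spec : Claim_equal_zero_pad_list := by
  intro fl sl cl _ _
  unfold Spec_zero_pad_list zero_pad_list zero_pad_list_alt
  dsimp only
  simp only [pv_contains_ofList]
  rw [pv_foldA cl _ [] 0 le_rfl]
  rw [show fl.length = (fl.map (fun x => if sl.contains x then x else 0)).length from
    (List.length_map _).symm]
  rw [pv_scatter]
  simp
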